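-- pv_equiv track=rewrite | github.com/Whateverdoa/OGOS_fastapi_pdfmodule | app/utils/stans_compound_path_converter.py | _pull_prelude
-- ===== SOURCE A (Python) =====
-- from typing import Dict, List, Optional, Set, Tuple
--
-- def _pull_prelude(filtered_lines: List[str]) -> List[str]:
--     prelude: List[str] = []
--     while filtered_lines:
--         candidate = filtered_lines[-1]
--         stripped = candidate.strip()
--         if stripped == 'q' or stripped.endswith(' gs') or stripped.endswith(' cm'):
--             prelude.append(filtered_lines.pop())
--         else:
--             break
--     prelude.reverse()
--     return prelude
-- ===== SOURCE B (Python) =====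
-- from typing import List
--
-- def _pull_prelude(filtered_lines: List[str]) -> List[str]:
--     i = len(filtered_lines)
--     while i > 0:
--         stripped = filtered_lines[i - 1].strip()
--         if stripped == 'q' or stripped.endswith(' gs') or stripped.endswith(' cm'):
--             i -= 1
--         else:
--             break
--     prelude = filtered_lines[i:]
--     del filtered_lines[i:]
--     return prelude
-- ===== Notes on version B (the rewrite author's own statement) =====
-- stated objective: simpler
-- what changed: Replaces the pop-append-then-reverse loop with a backward index scan that finds the prelude boundary, then takes one slice (already in order) and truncates the list in place; no per-element pop/append and no final reverse.
import Mathlib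
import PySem

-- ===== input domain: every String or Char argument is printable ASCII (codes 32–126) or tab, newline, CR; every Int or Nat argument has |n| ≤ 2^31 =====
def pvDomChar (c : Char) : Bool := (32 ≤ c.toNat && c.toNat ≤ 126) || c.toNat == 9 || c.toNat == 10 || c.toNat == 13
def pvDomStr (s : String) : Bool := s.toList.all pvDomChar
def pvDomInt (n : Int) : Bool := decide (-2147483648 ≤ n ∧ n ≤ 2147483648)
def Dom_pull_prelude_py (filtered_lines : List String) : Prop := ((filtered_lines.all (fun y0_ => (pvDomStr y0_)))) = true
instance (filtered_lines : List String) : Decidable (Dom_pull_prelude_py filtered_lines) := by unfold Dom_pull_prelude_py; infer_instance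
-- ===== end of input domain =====

-- B is a find-boundary-then-slice decomposition of A's pop/append/reverse loop (objective: simpler).
-- Both Pythons mutate filtered_lines in place identically; the equivalence proved here is about the return value.

-- the prelude test both Pythons apply to a line: stripped == 'q' or endswith ' gs'/' cm'
def pvIsPrelude (s : String) : Bool :=
  let stripped := PySem.Str.strip s
  stripped == "q" || PySem.Str.endswith stripped " gs" || PySem.Str.endswith stripped " cm"

-- ===== PORT A =====
-- the while loop: pop matching lines off the end, appending to prelude; recursion on the list length
def pullLoopA (xs : List String) (prelude : List String) : List String :=
  match h : xs with
  | [] => prelude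
  | _ :: _ =>
    let candidate := xs.getLast (by simp [h])
    if pvIsPrelude candidate then
      pullLoopA xs.dropLast (prelude ++ [candidate])
    else
      prelude
termination_by xs.length
decreasing_by simp [h, List.length_dropLast]

def pull_prelude_py (filtered_lines : List String) : List String :=
  (pullLoopA filtered_lines []).reverse

-- ===== PORT B =====
-- the backward index scan: decrement i while line i-1 matches
def pullIdxB (xs : List String) : Nat → Nat
  | 0 => 0
  | i + 1 => if pvIsPrelude (xs.getD i "") then pullIdxB xs i else i + 1

def pull_prelude_py_alt (filtered_lines : List String) : List String :=
  filtered_lines.drop (pullIdxB filtered_lines filtered_lines.length)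

-- ===== PRECONDITION & SPEC =====
def Spec_pull_prelude_py (filtered_lines : List String) (out : List String) : Prop := out = pull_prelude_py_alt filtered_lines
instance (filtered_lines : List String) (out : List String) : Decidable (Spec_pull_prelude_py filtered_lines out) := by unfold Spec_pull_prelude_py; infer_instance

-- ===== CLAIM (what is proved, stated in full; the proofs are below) =====
def Claim_equal_pull_prelude_py : Prop := ∀ (filtered_lines : List String), Dom_pull_prelude_py filtered_lines → Spec_pull_prelude_py filtered_lines (pull_prelude_py filtered_lines)

-- ===== LEMMAS AND PROOFS =====

theorem pullIdxB_le (xs : List String) (i : Nat) : pullIdxB xs i ≤ i := by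
  induction i with
  | zero => simp [pullIdxB]
  | succ i ih =>
    simp only [pullIdxB]
    split
    · omega
    · omega

theorem pullIdxB_append (ys : List String) (c : String) (i : Nat) (h : i ≤ ys.length) :
    pullIdxB (ys ++ [c]) i = pullIdxB ys i := by
  induction i with
  | zero => rfl
  | succ i ih =>
    have hi : i < ys.length := by omega
    simp only [pullIdxB, List.getD, List.getElem?_append_left hi]
    split
    · exact ih (by omega)
    · rfl

theorem pullLoopA_eq (xs : List String) (acc : List String) :
    pullLoopA xs acc = acc ++ (xs.drop (pullIdxB xs xs.length)).reverse := by
  induction xs using List.reverseRecOn generalizing acc with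
  | nil => simp [pullLoopA, pullIdxB]
  | append_singleton ys c ih =>
    rw [pullLoopA.eq_def]
    simp only [List.getLast_append_singleton, List.dropLast_concat]
    have hlen : (ys ++ [c]).length = ys.length + 1 := by simp
    by_cases hc : pvIsPrelude c
    · rw [if_pos hc, ih]
      have hb : pullIdxB (ys ++ [c]) (ys ++ [c]).length = pullIdxB ys ys.length := by
        rw [hlen]
        simp only [pullIdxB, List.getD, List.getElem?_append_right (le_refl ys.length)]
        simp [hc]
        exact pullIdxB_append ys c ys.length (le_refl _)
      rw [hb]
      have hk := pullIdxB_le ys ys.length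
      rw [List.drop_append_of_le_length hk]
      simp only [List.reverse_append, List.reverse_singleton, List.singleton_append]
      split
      · simp_all
      · simp
    · rw [if_neg hc]
      have hb : pullIdxB (ys ++ [c]) (ys ++ [c]).length = ys.length + 1 := by
        rw [hlen]
        simp only [pullIdxB, List.getD, List.getElem?_append_right (le_refl ys.length)]
        simp [hc]
      rw [hb, List.drop_eq_nil_of_le (by simp)]
      simp only [List.reverse_nil, List.append_nil]
      split
      · rfl
      · rfl

-- ===== VERDICT (by name: the statement is the Claim_ definition above) =====
theorem pull_prelude_py_spec : Claim_equal_pull_prelude_py := by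
  intro xs _
  unfold Spec_pull_prelude_py pull_prelude_py pull_prelude_py_alt
  rw [pullLoopA_eq]
  simp
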